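-- pv_equiv track=rewrite | github.com/alecasanchez/CoinRollSorter | CoinRollSorter.py | tally_coins
-- ===== SOURCE A (Python) =====
-- _quarter = 24
--
-- _dime = 18
--
-- _nickel = 21
--
-- _penny = 19
--
-- def tally_coins(bag_coins):
--
-- # Variables to keep track of the coin count
--     quarter_count = 0
--     dime_count = 0
--     nickel_count = 0
--     penny_count = 0
--     foreign_count = 0
--
-- # Running a for loop to check condition for all coins in bag
--     for coin in bag_coins:
--         if coin == _quarter:
--             quarter_count+=1
--         elif coin == _dime:
--             dime_count+=1
--         elif coin == _nickel:
--             nickel_count+=1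
--         elif coin == _penny:
--             penny_count+=1
--         else:
--             foreign_count+=1
--     return (quarter_count, dime_count, nickel_count, penny_count, foreign_count)
-- ===== SOURCE B (Python) =====
-- _quarter = 24
-- _dime = 18
-- _nickel = 21
-- _penny = 19
--
-- def tally_coins(bag_coins):
--     coins = list(bag_coins)
--     q = coins.count(_quarter)
--     d = coins.count(_dime)
--     n = coins.count(_nickel)
--     p = coins.count(_penny)
--     return (q, d, n, p, len(coins) - q - d - n - p)
-- ===== Notes on version B (the rewrite author's own statement) =====
-- stated objective: simpler
-- what changed: Replaced the single loop with five branch counters by four list.count scans plus foreign = len - sum of the known counts.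
import Mathlib
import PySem

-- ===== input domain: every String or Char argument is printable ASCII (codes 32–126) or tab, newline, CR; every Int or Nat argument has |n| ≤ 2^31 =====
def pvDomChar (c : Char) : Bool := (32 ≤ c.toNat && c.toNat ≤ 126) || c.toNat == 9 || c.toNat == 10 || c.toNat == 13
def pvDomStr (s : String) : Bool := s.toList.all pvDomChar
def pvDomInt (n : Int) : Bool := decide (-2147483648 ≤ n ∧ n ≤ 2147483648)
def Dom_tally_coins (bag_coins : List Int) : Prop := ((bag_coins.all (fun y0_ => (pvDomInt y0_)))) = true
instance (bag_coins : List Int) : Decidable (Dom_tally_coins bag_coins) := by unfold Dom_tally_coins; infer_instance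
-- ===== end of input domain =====

-- B replaces A's single five-counter branch loop by four list.count scans plus foreign = len - sum (simpler).

-- ===== PORT A =====
-- the body of A's for-loop, one step per coin over the five counters (branches in A's order)
def tallyStep (s : Int × Int × Int × Int × Int) (coin : Int) : Int × Int × Int × Int × Int :=
  let (q, d, n, p, f) := s
  if coin == 24 then (q + 1, d, n, p, f)
  else if coin == 18 then (q, d + 1, n, p, f)
  else if coin == 21 then (q, d, n + 1, p, f)
  else if coin == 19 then (q, d, n, p + 1, f)
  else (q, d, n, p, f + 1)

def tally_coins (bag_coins : List Int) : Int × Int × Int × Int × Int :=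
  bag_coins.foldl tallyStep (0, 0, 0, 0, 0)

-- ===== PORT B =====
def tally_coins_alt (bag_coins : List Int) : Int × Int × Int × Int × Int :=
  let q : Int := PySem.List.count bag_coins 24
  let d : Int := PySem.List.count bag_coins 18
  let n : Int := PySem.List.count bag_coins 21
  let p : Int := PySem.List.count bag_coins 19
  (q, d, n, p, (bag_coins.length : Int) - q - d - n - p)

-- ===== PRECONDITION & SPEC =====
def Spec_tally_coins (bag_coins : List Int) (out : Int × Int × Int × Int × Int) : Prop := out = tally_coins_alt bag_coins
instance (bag_coins : List Int) (out : Int × Int × Int × Int × Int) : Decidable (Spec_tally_coins bag_coins out) := by unfold Spec_tally_coins; infer_instance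

-- ===== CLAIM (what is proved, stated in full; the proofs are below) =====
def Claim_equal_tally_coins : Prop := ∀ (bag_coins : List Int), Dom_tally_coins bag_coins → Spec_tally_coins bag_coins (tally_coins bag_coins)

-- ===== LEMMAS AND PROOFS =====

theorem tally_coins_foldl_shift (xs : List Int) (q d n p f : Int) :
    xs.foldl tallyStep (q, d, n, p, f)
    = (q + PySem.List.count xs 24, d + PySem.List.count xs 18,
       n + PySem.List.count xs 21, p + PySem.List.count xs 19,
       f + ((xs.length : Int) - PySem.List.count xs 24 - PySem.List.count xs 18
            - PySem.List.count xs 21 - PySem.List.count xs 19)) := by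
  induction xs generalizing q d n p f with
  | nil => simp [PySem.List.count]
  | cons x xs ih =>
    rw [List.foldl_cons]
    by_cases h24 : x = 24
    · subst h24
      rw [show tallyStep (q, d, n, p, f) 24 = (q + 1, d, n, p, f) from rfl, ih]
      simp [PySem.List.count_eq, Prod.ext_iff]
      push_cast; omega
    · by_cases h18 : x = 18
      · subst h18
        rw [show tallyStep (q, d, n, p, f) 18 = (q, d + 1, n, p, f) from rfl, ih]
        simp [PySem.List.count_eq, Prod.ext_iff]
        push_cast; omega
      · by_cases h21 : x = 21
        · subst h21
          rw [show tallyStep (q, d, n, p, f) 21 = (q, d, n + 1, p, f) from rfl, ih]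
          simp [PySem.List.count_eq, Prod.ext_iff]
          push_cast; omega
        · by_cases h19 : x = 19
          · subst h19
            rw [show tallyStep (q, d, n, p, f) 19 = (q, d, n, p + 1, f) from rfl, ih]
            simp [PySem.List.count_eq, Prod.ext_iff]
            push_cast; omega
          · rw [show tallyStep (q, d, n, p, f) x = (q, d, n, p, f + 1) from by
                simp [tallyStep, h24, h18, h21, h19], ih]
            simp [PySem.List.count_eq, h24, h18, h21, h19, Prod.ext_iff]
            push_cast; omega

-- ===== VERDICT (by name: the statement is the Claim_ definition above) =====
theorem tally_coins_spec : Claim_equal_tally_coins := by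
  intro bag_coins _
  unfold Spec_tally_coins tally_coins tally_coins_alt
  rw [tally_coins_foldl_shift]
  simp
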